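-- pv_equiv track=rewrite | github.com/Hoyeri/diat-eval | src/eval_diat.py | normalize_options_from_sample
-- ===== SOURCE A (Python) =====
-- OPTION_KEYS = ["opa", "opb", "opc", "opd", "ope", "opf", "opg"]
--
-- MIN_OPTIONS = 2
--
-- MAX_OPTIONS = 7
--
-- def normalize_options_from_sample(sample):
--     options = []
--     seen_gap = False
--
--     for key in OPTION_KEYS:
--         if key in sample and sample[key] is not None and str(sample[key]).strip() != "":
--             if seen_gap:
--                 raise ValueError(
--                     "Option keys must be contiguous (e.g., opa, opb, opc...)."
--                 )
--             options.append(str(sample[key]))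
--         else:
--             if options:
--                 seen_gap = True
--
--     if not (MIN_OPTIONS <= len(options) <= MAX_OPTIONS):
--         raise ValueError(
--             f"Option count must be between {MIN_OPTIONS} and {MAX_OPTIONS}, got {len(options)}."
--         )
--
--     letters = [chr(ord("A") + i) for i in range(len(options))]
--     return {letters[i]: options[i] for i in range(len(options))}, letters
-- ===== SOURCE B (Python) =====
-- OPTION_KEYS = ["opa", "opb", "opc", "opd", "ope", "opf", "opg"]
--
-- MIN_OPTIONS = 2
--
-- MAX_OPTIONS = 7
--
-- def normalize_options_from_sample(sample):
--     present = [(i, key) for i, key in enumerate(OPTION_KEYS)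
--                if key in sample and sample[key] is not None and str(sample[key]).strip() != ""]
--     indices = [i for i, _ in present]
--     if indices and indices != list(range(indices[0], indices[-1] + 1)):
--         raise ValueError("Option keys must be contiguous (e.g., opa, opb, opc...).")
--     options = [str(sample[key]) for _, key in present]
--     if not (MIN_OPTIONS <= len(options) <= MAX_OPTIONS):
--         raise ValueError(f"Option count must be between {MIN_OPTIONS} and {MAX_OPTIONS}, got {len(options)}.")
--     letters = [chr(ord("A") + i) for i in range(len(options))]
--     return dict(zip(letters, options)), letters
-- ===== Notes on version B (the rewrite author's own statement) =====
-- stated objective: alternative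
-- what changed: Replaces A's stateful seen_gap loop with a declarative pipeline: one filtered enumerate pass builds the present (index, key) list, contiguity is checked by comparing the index list to range(first, last+1), and the dict is built by zip(letters, options).
import Mathlib
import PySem

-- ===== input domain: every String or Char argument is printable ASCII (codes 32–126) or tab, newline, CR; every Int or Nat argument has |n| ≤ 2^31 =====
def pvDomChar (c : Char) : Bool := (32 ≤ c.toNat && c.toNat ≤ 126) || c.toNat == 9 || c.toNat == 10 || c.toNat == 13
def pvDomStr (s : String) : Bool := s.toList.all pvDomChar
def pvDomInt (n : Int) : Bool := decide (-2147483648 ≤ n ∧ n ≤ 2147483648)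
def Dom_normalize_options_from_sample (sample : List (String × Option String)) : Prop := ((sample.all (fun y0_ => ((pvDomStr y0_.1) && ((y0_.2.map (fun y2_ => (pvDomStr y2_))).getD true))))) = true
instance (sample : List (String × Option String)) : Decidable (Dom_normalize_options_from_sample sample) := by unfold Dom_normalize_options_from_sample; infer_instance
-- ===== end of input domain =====

-- B re-implements A by a different decomposition: one filtered `enumerate` pass plus an
-- index-range contiguity test replaces A's stateful seen_gap loop; same values everywhere A returns.

-- shared helpers: the Python dict `sample` is an association list; lookup = first match
def pvKeys : List String := ["opa", "opb", "opc", "opd", "ope", "opf", "opg"]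

def pvLookup (sample : List (String × Option String)) (k : String) : Option (Option String) :=
  (sample.find? (fun p => p.1 == k)).map (·.2)

-- `key in sample and sample[key] is not None and str(sample[key]).strip() != ""`
def pvPresent (sample : List (String × Option String)) (k : String) : Bool :=
  match pvLookup sample k with
  | some (some v) => !(PySem.Str.strip v == "")
  | _ => false

-- `str(sample[key])` on a present key (the value is a string there)
def pvVal (sample : List (String × Option String)) (k : String) : String :=
  match pvLookup sample k with
  | some (some v) => v
  | _ => ""

-- ===== PORT A =====
-- A's loop; `none` is exactly Python's contiguity ValueError (excluded by Pre_)
def pvLoopA (sample : List (String × Option String)) :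
    List String → List String → Bool → Option (List String)
  | [], options, _ => some options
  | k :: rest, options, seen_gap =>
    if pvPresent sample k then
      if seen_gap then none
      else pvLoopA sample rest (options ++ [pvVal sample k]) seen_gap
    else pvLoopA sample rest options (seen_gap || !options.isEmpty)

def normalize_options_from_sample (sample : List (String × Option String)) : (List (String × String)) × List String :=
  match pvLoopA sample pvKeys [] false with
  | none => ([], [])  -- contiguity ValueError: excluded by Pre_
  | some options =>
    if ¬(2 ≤ options.length ∧ options.length ≤ 7) then ([], [])  -- count ValueError: excluded by Pre_
    else
      let letters := (List.range options.length).map (fun i => String.ofList [Char.ofNat (65 + i)])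
      ((List.range options.length).map (fun i => (letters.getD i "", options.getD i "")), letters)

-- ===== PORT B =====
def normalize_options_from_sample_alt (sample : List (String × Option String)) : (List (String × String)) × List String :=
  let present := (PySem.List.enumerate pvKeys 0).filter (fun p => pvPresent sample p.2)
  let indices := present.map (·.1)
  if indices ≠ [] ∧ indices ≠ PySem.List.pyRange (indices.headD 0) (PySem.List.pyGetD indices (-1) 0 + 1) 1 then
    ([], [])  -- contiguity ValueError: excluded by Pre_
  else
    let options := present.map (fun p => pvVal sample p.2)
    if ¬(2 ≤ options.length ∧ options.length ≤ 7) then ([], [])  -- count ValueError: excluded by Pre_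
    else
      let letters := (List.range options.length).map (fun i => String.ofList [Char.ofNat (65 + i)])
      (letters.zip options, letters)

-- ===== PRECONDITION & SPEC =====
-- Pre_ excludes exactly the inputs on which Python A raises ValueError: the present option
-- keys must form one contiguous run and number between 2 and 7.
def Pre_normalize_options_from_sample (sample : List (String × Option String)) : Prop :=
  let idxs := (List.range 7).filter (fun i => pvPresent sample (pvKeys.getD i ""))
  idxs = List.range' (idxs.headD 0) idxs.length ∧ 2 ≤ idxs.length ∧ idxs.length ≤ 7
instance (sample : List (String × Option String)) : Decidable (Pre_normalize_options_from_sample sample) := by unfold Pre_normalize_options_from_sample; infer_instance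

def pvWitness_normalize_options_from_sample : (List (String × Option String)) :=
  [("opa", some "yes"), ("opb", some "no")]

def Spec_normalize_options_from_sample (sample : List (String × Option String)) (out : (List (String × String)) × List String) : Prop := out = normalize_options_from_sample_alt sample
instance (sample : List (String × Option String)) (out : (List (String × String)) × List String) : Decidable (Spec_normalize_options_from_sample sample out) := by unfold Spec_normalize_options_from_sample; infer_instance

-- ===== CLAIM (what is proved, stated in full; the proofs are below) =====
def Claim_equal_normalize_options_from_sample : Prop := ∀ (sample : List (String × Option String)), Dom_normalize_options_from_sample sample → Pre_normalize_options_from_sample sample → Spec_normalize_options_from_sample sample (normalize_options_from_sample sample)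

-- ===== LEMMAS AND PROOFS =====

-- ===== VERDICT (by name: the statement is the Claim_ definition above) =====
set_option maxHeartbeats 4000000 in
theorem normalize_options_from_sample_spec : Claim_equal_normalize_options_from_sample := by
  intro sample _ _
  unfold Spec_normalize_options_from_sample
  by_cases h0 : pvPresent sample "opa" <;>
  by_cases h1 : pvPresent sample "opb" <;>
  by_cases h2 : pvPresent sample "opc" <;>
  by_cases h3 : pvPresent sample "opd" <;>
  by_cases h4 : pvPresent sample "ope" <;>
  by_cases h5 : pvPresent sample "opf" <;>
  by_cases h6 : pvPresent sample "opg" <;>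
    simp [normalize_options_from_sample, normalize_options_from_sample_alt, pvLoopA, pvKeys,
      PySem.List.enumerate, PySem.List.pyRange, PySem.List.pyGetD, PySem.List.pyGet?, PySem.List.pyIdx?, List.range_succ,
      h0, h1, h2, h3, h4, h5, h6]
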